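-- pv_equiv track=rewrite | github.com/LLLL-Hui/AI_exe | greedySearch.py | findMinErr
-- ===== SOURCE A (Python) =====
-- from typing import List
--
-- def findMinErr(A: List[int], target: int):
--     val = 0
--     temp = []
--
--     for i in range(len(A) - 1, -1, -1):
--         if A[i] > target:
--             val = A[i]
--         else:
--             break
--
--     return val
-- ===== SOURCE B (Python) =====
-- from typing import List
--
-- def findMinErr(A: List[int], target: int):
--     boundary = -1
--     for i, x in enumerate(A):
--         if x <= target:
--             boundary = i
--     if boundary + 1 < len(A):
--         return A[boundary + 1]
--     return 0
-- ===== Notes on version B (the rewrite author's own statement) =====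
-- stated objective: alternative
-- what changed: Replaces the backward index loop with early break and an accumulated val by a single forward pass over enumerate(A) that records the last index holding an element <= target, then answers with one index lookup A[boundary+1] (or 0 when the trailing run is empty).
import Mathlib
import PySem

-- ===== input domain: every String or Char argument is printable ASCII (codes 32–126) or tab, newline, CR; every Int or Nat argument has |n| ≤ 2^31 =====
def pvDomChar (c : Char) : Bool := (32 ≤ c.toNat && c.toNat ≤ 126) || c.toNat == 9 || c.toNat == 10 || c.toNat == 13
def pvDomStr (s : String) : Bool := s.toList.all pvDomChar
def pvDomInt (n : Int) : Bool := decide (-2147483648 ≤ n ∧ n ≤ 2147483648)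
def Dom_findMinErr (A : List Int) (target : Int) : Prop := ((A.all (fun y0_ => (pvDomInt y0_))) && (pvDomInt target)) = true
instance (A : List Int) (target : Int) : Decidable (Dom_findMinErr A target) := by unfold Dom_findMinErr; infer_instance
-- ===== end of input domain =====

-- B replaces A's backward index loop (accumulating val, early break) by one forward
-- pass recording the last index with element ≤ target, then a single index lookup
-- (objective: alternative decomposition; same O(n) cost).

-- ===== PORT A =====
-- 'for i in range(len(A)-1, -1, -1): if A[i] > target: val = A[i] else: break'
def findMinErrLoop (A : List Int) (target : Int) : List Int → Int → Int
  | [], val => val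
  | i :: rest, val =>
    let a := (PySem.List.pyGet? A i).getD 0   -- index from range always valid, so getD never fires
    if a > target then findMinErrLoop A target rest a else val

def findMinErr (A : List Int) (target : Int) : Int :=
  findMinErrLoop A target (PySem.List.pyRange ((A.length : Int) - 1) (-1) (-1)) 0

-- ===== PORT B =====
-- 'boundary = -1; for i, x in enumerate(A): if x <= target: boundary = i'
def findMinErr_alt (A : List Int) (target : Int) : Int :=
  let boundary := (PySem.List.enumerate A).foldl
    (fun b p => if p.2 ≤ target then p.1 else b) (-1 : Int)
  if boundary + 1 < (A.length : Int) then (PySem.List.pyGet? A (boundary + 1)).getD 0 else 0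

-- ===== PRECONDITION & SPEC =====
def Spec_findMinErr (A : List Int) (target : Int) (out : Int) : Prop := out = findMinErr_alt A target
instance (A : List Int) (target : Int) (out : Int) : Decidable (Spec_findMinErr A target out) := by unfold Spec_findMinErr; infer_instance

-- ===== CLAIM (what is proved, stated in full; the proofs are below) =====
def Claim_equal_findMinErr : Prop := ∀ (A : List Int) (target : Int), Dom_findMinErr A target → Spec_findMinErr A target (findMinErr A target)

-- ===== LEMMAS AND PROOFS =====

-- the backward index loop as a structural loop over the reversed list
def loopRev (target : Int) : List Int → Int → Int
  | [], val => val
  | a :: rest, val => if a > target then loopRev target rest a else val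

theorem findMinErrLoop_eq_loopRev (A : List Int) (target : Int) :
    ∀ (k : Nat), k ≤ A.length → ∀ (val : Int),
      findMinErrLoop A target (PySem.List.pyRange ((k : Int) - 1) (-1) (-1)) val
        = loopRev target ((A.take k).reverse) val := by
  intro k
  induction k with
  | zero =>
    intro _ val
    simp [PySem.List.pyRange_neg_one_eq_nil, findMinErrLoop, loopRev]
  | succ n ih =>
    intro hk val
    have hn : n < A.length := by omega
    have hcons : PySem.List.pyRange (((n : Int) + 1) - 1) (-1) (-1)
        = ((n : Int) + 1 - 1) :: PySem.List.pyRange (((n : Int) + 1 - 1) - 1) (-1) (-1) := by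
      apply PySem.List.pyRange_neg_one_cons; omega
    have htake : (A.take (n + 1)).reverse = A[n] :: (A.take n).reverse := by
      rw [List.take_add_one, List.getElem?_eq_getElem hn]
      simp
    have hget : PySem.List.pyGet? A ((n : Int) + 1 - 1) = some A[n] := by
      have : ((n : Int) + 1 - 1) = ((n : Nat) : Int) := by omega
      rw [this, PySem.List.pyGet?_natCast, List.getElem?_eq_getElem hn]
    push_cast
    rw [hcons, htake, findMinErrLoop, hget]
    simp only [Option.getD_some, loopRev]
    by_cases h : A[n] > target
    · simp only [if_pos h]
      have : ((n : Int) + 1 - 1) - 1 = (n : Int) - 1 := by omega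
      rw [this, ih (Nat.le_of_lt hn) A[n]]
    · simp only [if_neg h]

theorem loopRev_eq_takeWhile (target : Int) :
    ∀ (l : List Int) (val : Int),
      loopRev target l val = (l.takeWhile (fun a => decide (target < a))).getLastD val := by
  intro l
  induction l with
  | nil => intro val; simp [loopRev]
  | cons a rest ih =>
    intro val
    by_cases h : target < a
    · have h1 : loopRev target (a :: rest) val = loopRev target rest a := by
        simp [loopRev, h]
      have h2 : (a :: rest).takeWhile (fun a => decide (target < a))
          = a :: rest.takeWhile (fun a => decide (target < a)) := by
        simp [h]
      rw [h1, h2, ih a, List.getLastD_cons]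
    · simp [loopRev, h]

theorem findMinErr_eq_takeWhile (A : List Int) (target : Int) :
    findMinErr A target = ((A.reverse.takeWhile (fun a => decide (target < a))).getLastD 0) := by
  unfold findMinErr
  rw [findMinErrLoop_eq_loopRev A target A.length (le_refl _) 0, List.take_length,
    loopRev_eq_takeWhile]

theorem boundary_eq (target : Int) :
    ∀ (A : List Int),
      (PySem.List.enumerate A).foldl (fun b p => if p.2 ≤ target then p.1 else b) (-1 : Int)
        = (A.length : Int) - ((A.reverse.takeWhile (fun a => decide (target < a))).length : Int) - 1 := by
  intro A
  induction A using List.reverseRecOn with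
  | nil => simp [PySem.List.enumerate]
  | append_singleton xs x ih =>
    rw [PySem.List.enumerate_append]
    simp only [List.foldl_append, PySem.List.enumerate, List.reverse_append,
      List.reverse_singleton, List.singleton_append, List.takeWhile_cons]
    by_cases h : target < x
    · have : ¬ (x ≤ target) := by omega
      simp only [decide_eq_true h, List.foldl_cons, List.foldl_nil, this, if_false]
      rw [ih]
      push_cast [List.length_cons, List.length_append, List.length_nil]
      ring
    · have hx : x ≤ target := by omega
      simp only [decide_eq_false h, List.foldl_cons, List.foldl_nil, hx, if_true]
      simp

theorem findMinErr_main (A : List Int) (target : Int) :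
    findMinErr A target = findMinErr_alt A target := by
  rw [findMinErr_eq_takeWhile]
  simp only [findMinErr_alt]
  rw [boundary_eq]
  set tw := A.reverse.takeWhile (fun a => decide (target < a)) with htw
  have hk : tw.length ≤ A.length := by
    calc tw.length ≤ A.reverse.length := (List.takeWhile_prefix _).length_le
    _ = A.length := List.length_reverse
  by_cases h0 : tw.length = 0
  · have htwnil : tw = [] := List.eq_nil_of_length_eq_zero h0
    rw [if_neg (by omega), htwnil, List.getLastD_nil]
  · have hpos : 0 < tw.length := Nat.pos_of_ne_zero h0
    have hlt : (A.length : Int) - (tw.length : Int) - 1 + 1 < (A.length : Int) := by omega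
    rw [if_pos (by exact_mod_cast hlt)]
    have hidx : (A.length : Int) - (tw.length : Int) - 1 + 1 = ((A.length - tw.length : Nat) : Int) := by
      omega
    rw [hidx, PySem.List.pyGet?_natCast]
    have hnlt : A.length - tw.length < A.length := by omega
    rw [List.getElem?_eq_getElem hnlt, Option.getD_some]
    -- tw is a prefix of A.reverse, so its entries agree with A.reverse's
    have hpre : tw <+: A.reverse := by rw [htw]; exact List.takeWhile_prefix _
    have hrevlen : tw.length - 1 < A.reverse.length := by
      rw [List.length_reverse]; omega
    have hlast : tw.getLastD 0 = A.reverse[tw.length - 1] := by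
      rw [List.getLastD_eq_getLast?, List.getLast?_eq_getElem?]
      have hagree : tw[tw.length - 1]? = A.reverse[tw.length - 1]? := by
        obtain ⟨t, ht⟩ := hpre
        rw [← ht, List.getElem?_append_left (by omega)]
      rw [hagree, List.getElem?_eq_getElem hrevlen, Option.getD_some]
    rw [hlast, List.getElem_reverse]
    congr 1
    omega

-- ===== VERDICT (by name: the statement is the Claim_ definition above) =====
theorem findMinErr_spec : Claim_equal_findMinErr := by
  intro A target _
  unfold Spec_findMinErr
  exact findMinErr_main A target
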